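-- pv_equiv track=rewrite | github.com/minidiva/labs | lab3/function1.py | spy_game
-- ===== SOURCE A (Python) =====
-- def spy_game(nums):
--     a = []
--     for x in nums:
--         if x == 0 or x == 7:
--             a.append(x)
--     if a[0:3] == [0,0,7]:
--         return True
--     else:
--         return False
-- ===== SOURCE B (Python) =====
-- def spy_game(nums):
--     pattern = [0, 0, 7]
--     for x in nums:
--         if x == 0 or x == 7:
--             if x != pattern[0]:
--                 return False
--             pattern = pattern[1:]
--             if not pattern:
--                 return True
--     return False
-- ===== Notes on version B (the rewrite author's own statement) =====
-- stated objective: alternative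
-- what changed: B streams over nums matching the expected pattern position by position with early exit, instead of building the full filtered list and slice-comparing it.
import Mathlib
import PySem

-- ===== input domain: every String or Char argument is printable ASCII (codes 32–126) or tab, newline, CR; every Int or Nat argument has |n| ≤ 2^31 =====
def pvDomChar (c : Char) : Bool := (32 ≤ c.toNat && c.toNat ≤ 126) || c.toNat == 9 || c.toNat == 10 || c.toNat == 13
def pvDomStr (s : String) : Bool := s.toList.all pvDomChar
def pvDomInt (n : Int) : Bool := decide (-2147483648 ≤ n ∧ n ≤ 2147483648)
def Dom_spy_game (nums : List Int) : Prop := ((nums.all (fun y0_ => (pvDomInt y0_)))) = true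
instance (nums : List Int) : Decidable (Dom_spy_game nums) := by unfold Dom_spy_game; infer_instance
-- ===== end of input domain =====

-- B matches pattern [0,0,7] position by position in one streaming pass with early exit,
-- instead of building the filtered list and slice-comparing (alternative decomposition, same cost).

-- ===== PORT A =====
def spy_game (nums : List Int) : Bool :=
  let a := nums.foldl (fun acc x => if x = 0 ∨ x = 7 then acc ++ [x] else acc) []
  if PySem.List.slice a (some 0) (some 3) = [0, 0, 7] then true else false

-- ===== PORT B =====
def spyAltGo (pat : List Int) : List Int → Bool
  | [] => false
  | x :: xs =>
    if x = 0 ∨ x = 7 then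
      match pat with
      | [] => false
      | p :: ps =>
        if x ≠ p then false
        else if ps = [] then true
        else spyAltGo ps xs
    else spyAltGo pat xs

def spy_game_alt (nums : List Int) : Bool := spyAltGo [0, 0, 7] nums

-- ===== PRECONDITION & SPEC =====
def Spec_spy_game (nums : List Int) (out : Bool) : Prop := out = spy_game_alt nums
instance (nums : List Int) (out : Bool) : Decidable (Spec_spy_game nums out) := by unfold Spec_spy_game; infer_instance

-- ===== CLAIM (what is proved, stated in full; the proofs are below) =====
def Claim_equal_spy_game : Prop := ∀ (nums : List Int), Dom_spy_game nums → Spec_spy_game nums (spy_game nums)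

-- ===== LEMMAS AND PROOFS =====

-- ===== VERDICT (by name: the statement is the Claim_ definition above) =====
def spyKeep (x : Int) : Bool := decide (x = 0 ∨ x = 7)

lemma foldl_app_eq_filter (nums acc : List Int) :
    nums.foldl (fun acc x => if x = 0 ∨ x = 7 then acc ++ [x] else acc) acc
      = acc ++ nums.filter spyKeep := by
  induction nums generalizing acc with
  | nil => simp
  | cons x xs ih =>
    simp only [List.foldl_cons, List.filter_cons, spyKeep]
    by_cases h : x = 0 ∨ x = 7 <;> simp [h, ih]

lemma go_eq (pat : List Int) (hpat : pat ≠ []) (xs : List Int) :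
    spyAltGo pat xs = decide ((xs.filter spyKeep).take pat.length = pat) := by
  induction xs generalizing pat with
  | nil => cases pat with
    | nil => exact absurd rfl hpat
    | cons p ps => simp [spyAltGo]
  | cons x xs ih =>
    by_cases hk : x = 0 ∨ x = 7
    · cases pat with
      | nil => exact absurd rfl hpat
      | cons p ps =>
        simp only [spyAltGo, if_pos hk, List.filter_cons]
        rw [if_pos (show spyKeep x = true by simp [spyKeep, hk])]
        by_cases hxp : x = p
        · subst hxp
          rw [if_neg (show ¬ x ≠ x by simp)]
          by_cases hps : ps = []
          · subst hps; simp [List.take_succ_cons]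
          · rw [if_neg hps, ih ps hps]
            simp [List.take_succ_cons]
        · rw [if_pos hxp]
          simp [List.take_succ_cons, hxp]
    · simp only [spyAltGo, if_neg hk, List.filter_cons]
      rw [if_neg (show ¬ spyKeep x = true by simp [spyKeep, hk])]
      exact ih pat hpat

theorem spy_game_spec : Claim_equal_spy_game := by
  intro nums _
  unfold Spec_spy_game spy_game spy_game_alt
  rw [go_eq [0,0,7] (by simp) nums]
  simp only [foldl_app_eq_filter, List.nil_append]
  have h3 : PySem.List.slice (List.filter spyKeep nums) (some (0:Int)) (some (3:Int))
      = (List.filter spyKeep nums).take 3 := by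
    rw [show ((some (0:Int)) = some ((0:Nat):Int)) from rfl,
        show ((some (3:Int)) = some ((3:Nat):Int)) from rfl,
        PySem.List.slice_natCast]
    simp
  simp only [h3, List.length_cons, List.length_nil]
  split_ifs with h <;> simp [h]
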